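-- pv_equiv track=rewrite | github.com/ShawnStrasser/ATC-Signal-Replay | experiments/run_latency_scaling_study.py | commands_for_detector_count
-- ===== SOURCE A (Python) =====
-- def commands_for_detector_count(detector_count: int, action: str) -> list[tuple[int, int]]:
--     commands = []
--     remaining = detector_count
--     group_number = 1
--     while remaining > 0:
--         active_in_group = min(8, remaining)
--         if action == "on":
--             state = (1 << active_in_group) - 1
--         else:
--             state = 0
--         commands.append((group_number, state))
--         remaining -= active_in_group
--         group_number += 1
--     return commands
-- ===== SOURCE B (Python) =====
-- def commands_for_detector_count(detector_count: int, action: str) -> list[tuple[int, int]]: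
--     if detector_count <= 0:
--         return []
--     groups = -(-detector_count // 8)
--     mask = (1 << detector_count) - 1 if action == "on" else 0
--     return list(enumerate(mask.to_bytes(groups, "little"), start=1))
-- ===== Notes on version B (the rewrite author's own statement) =====
-- stated objective: alternative
-- what changed: Instead of a while-loop that threads a `remaining` accumulator and computes min(8, remaining) and a fresh shift per group, B builds the full detector bitmask (1<<detector_count)-1 once (0 for 'off') and reads all group states off at once as its little-endian bytes via int.to_bytes, enumerated from 1.
import Mathlib
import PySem

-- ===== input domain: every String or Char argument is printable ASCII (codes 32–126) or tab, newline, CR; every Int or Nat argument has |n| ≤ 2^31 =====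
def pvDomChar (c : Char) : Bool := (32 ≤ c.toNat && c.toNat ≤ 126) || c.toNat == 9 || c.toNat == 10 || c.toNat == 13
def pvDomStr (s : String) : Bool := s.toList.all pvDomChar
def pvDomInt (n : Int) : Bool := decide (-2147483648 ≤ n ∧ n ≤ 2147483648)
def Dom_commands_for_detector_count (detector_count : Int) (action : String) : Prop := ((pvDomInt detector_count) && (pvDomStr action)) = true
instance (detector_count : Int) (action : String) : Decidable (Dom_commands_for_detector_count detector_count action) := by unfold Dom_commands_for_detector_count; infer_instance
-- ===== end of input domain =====

-- B replaces A's group-by-group while-loop (accumulator, per-step min and shift) with a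
-- different mechanism: build the full detector bitmask (1<<n)-1 once and read the group states
-- off as its little-endian base-256 bytes via int.to_bytes, then enumerate them from 1
-- (objective: alternative).

-- ===== PORT A =====
-- the while loop of A: state (remaining, group_number), one recursive call per iteration
def pvGoA (remaining : Int) (group_number : Int) (action : String) : List (Int × Int) :=
  if h : remaining > 0 then
    let active_in_group := min 8 remaining
    let state : Int := if action == "on" then (1 <<< active_in_group.toNat) - 1 else 0
    (group_number, state) :: pvGoA (remaining - active_in_group) (group_number + 1) action
  else []
termination_by remaining.toNat
decreasing_by omega

def commands_for_detector_count (detector_count : Int) (action : String) : List (Int × Int) :=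
  pvGoA detector_count 1 action

-- ===== PORT B =====
-- mask.to_bytes(k, "little"): the k little-endian base-256 digits of mask (exact for mask ≥ 0,
-- which holds here; Python raises OverflowError only if mask needs more than k bytes — never here)
def pvBytesLE (k : Nat) (mask : Int) : List Int :=
  match k with
  | 0 => []
  | k + 1 => (mask % 256) :: pvBytesLE k (mask / 256)

-- enumerate(xs, start=g)
def pvEnum (g : Int) : List Int → List (Int × Int)
  | [] => []
  | d :: ds => (g, d) :: pvEnum (g + 1) ds

def commands_for_detector_count_alt (detector_count : Int) (action : String) : List (Int × Int) :=
  if detector_count ≤ 0 then []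
  else
    let groups := -(PySem.Int.floordiv (-detector_count) 8)
    let mask : Int := if action == "on" then (1 <<< detector_count.toNat) - 1 else 0
    pvEnum 1 (pvBytesLE groups.toNat mask)

-- ===== PRECONDITION & SPEC =====
def Spec_commands_for_detector_count (detector_count : Int) (action : String) (out : List (Int × Int)) : Prop := out = commands_for_detector_count_alt detector_count action
instance (detector_count : Int) (action : String) (out : List (Int × Int)) : Decidable (Spec_commands_for_detector_count detector_count action out) := by unfold Spec_commands_for_detector_count; infer_instance

-- ===== CLAIM =====
def Claim_equal_commands_for_detector_count : Prop := ∀ (detector_count : Int) (action : String), Dom_commands_for_detector_count detector_count action → Spec_commands_for_detector_count detector_count action (commands_for_detector_count detector_count action)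

-- ===== LEMMAS AND PROOFS =====

-- the mask A's states correspond to, as a function of the remaining count
def pvMask (r : Int) (action : String) : Int :=
  if action == "on" then (1 <<< r.toNat) - 1 else 0

theorem pvShift_eq_pow (n : Nat) : ((1 : Int) <<< n) = 2 ^ n := by
  simp [Int.shiftLeft_eq]

theorem pvMask_split (r : Int) (action : String) (hr : 8 < r) :
    pvMask r action = 256 * pvMask (r - 8) action + (if action == "on" then 255 else 0) := by
  unfold pvMask
  by_cases h : action == "on" <;> simp [h, pvShift_eq_pow]
  have h8 : r.toNat = (r - 8).toNat + 8 := by omega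
  rw [h8, pow_add]
  ring

theorem pvGoA_stop (r g : Int) (action : String) (hr : ¬ r > 0) :
    pvGoA r g action = [] := by
  rw [pvGoA]; simp [hr]

theorem pvGoA_step (r g : Int) (action : String) (hr : r > 0) :
    pvGoA r g action =
      (g, if action == "on" then ((1:Int) <<< (min 8 r).toNat) - 1 else 0)
        :: pvGoA (r - min 8 r) (g + 1) action := by
  rw [pvGoA]; simp [hr]

theorem pvGoA_eq_enum (action : String) : ∀ (k : Nat) (r g : Int), 0 < r →
    PySem.Int.floordiv (r + 7) 8 = (k : Int) →
    pvGoA r g action = pvEnum g (pvBytesLE k (pvMask r action)) := by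
  intro k
  induction k with
  | zero =>
    intro r g hr hk
    rw [PySem.Int.floordiv_eq_ediv_of_pos (by omega : (0:Int) < 8)] at hk
    omega
  | succ k ih =>
    intro r g hr hk
    rw [PySem.Int.floordiv_eq_ediv_of_pos (by omega : (0:Int) < 8)] at hk
    rw [pvGoA_step r g action hr]
    by_cases h8 : r ≤ 8
    · have hk0 : k = 0 := by omega
      have hmin : min (8:Int) r = r := by omega
      rw [hmin, pvGoA_stop _ _ _ (by omega : ¬ r - r > 0)]
      subst hk0
      have hmaskmod : pvMask r action % 256 = (if action == "on" then ((1:Int) <<< r.toNat) - 1 else 0) := by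
        unfold pvMask
        by_cases h : action == "on" <;> simp [h, pvShift_eq_pow]
        have hle : (2:Int) ^ r.toNat ≤ 256 := by
          calc (2:Int) ^ r.toNat ≤ 2 ^ 8 := by
                apply pow_le_pow_right₀ (by norm_num) (by omega)
            _ = 256 := by norm_num
        have hpos : (0:Int) < 2 ^ r.toNat := by positivity
        omega
      simp [pvBytesLE, pvEnum, hmaskmod]
    · have hmin : min (8:Int) r = 8 := by omega
      have hsplit := pvMask_split r action (by omega)
      have hmod : pvMask r action % 256 = (if action == "on" then (255:Int) else 0) := by
        by_cases h : action == "on" <;> simp [h] at hsplit ⊢ <;> omega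
      have hdiv : pvMask r action / 256 = pvMask (r - 8) action := by
        by_cases h : action == "on" <;> simp [h] at hsplit ⊢ <;> omega
      have hrec := ih (r - 8) (g + 1) (by omega) (by
        rw [PySem.Int.floordiv_eq_ediv_of_pos (by omega : (0:Int) < 8)]; omega)
      rw [hmin, hrec]
      simp only [pvBytesLE, pvEnum, hmod, hdiv]
      by_cases h : action == "on"
      · simp [h, pvShift_eq_pow]
      · simp [h]

-- ===== VERDICT =====
theorem commands_for_detector_count_spec : Claim_equal_commands_for_detector_count := by
  intro d action _
  unfold Spec_commands_for_detector_count commands_for_detector_count commands_for_detector_count_alt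
  by_cases hd : d ≤ 0
  · rw [if_pos hd, pvGoA, dif_neg (by omega : ¬ d > 0)]
  · rw [if_neg hd]
    have hfd : PySem.Int.floordiv (-d) 8 = (-d) / 8 :=
      PySem.Int.floordiv_eq_ediv_of_pos (by omega)
    have hk : PySem.Int.floordiv (d + 7) 8 = (((-(PySem.Int.floordiv (-d) 8)).toNat : Nat) : Int) := by
      rw [hfd, PySem.Int.floordiv_eq_ediv_of_pos (by omega : (0:Int) < 8)]
      omega
    exact pvGoA_eq_enum action _ d 1 (by omega) hk
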